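-- pv_equiv track=rewrite | github.com/kaenozu/day_trade | src/day_trade/data/version_manager/tag_manager.py | validate_tag_name
-- ===== SOURCE A (Python) =====
-- def validate_tag_name(tag_name: str) -> bool:
--     """タグ名の有効性を検証
--
--     Args:
--         tag_name: 検証するタグ名
--
--     Returns:
--         有効な場合True
--     """
--     if not tag_name or len(tag_name) == 0:
--         return False
--
--     # 長さチェック
--     if len(tag_name) > 100:
--         return False
--
--     # 基本的な文字チェック
--     invalid_chars = [" ", "\t", "\n", ":", "*", "?", '"', "<", ">", "|", "\\", "/"]
--     if any(char in tag_name for char in invalid_chars):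
--         return False
--
--     # 制御文字チェック
--     if any(ord(char) < 32 for char in tag_name):
--         return False
--
--     return True
-- ===== SOURCE B (Python) =====
-- def validate_tag_name(tag_name: str) -> bool:
--     if not tag_name:
--         return False
--     if len(tag_name) > 100:
--         return False
--     invalid_set = {" ", "\t", "\n", ":", "*", "?", '"', "<", ">", "|", "\\", "/"}
--     for c in tag_name:
--         if c in invalid_set or ord(c) < 32:
--             return False
--     return True
-- ===== Notes on version B (the rewrite author's own statement) =====
-- stated objective: simpler
-- what changed: Replaces A's per-invalid-character substring scans (12 passes over the string) plus a separate control-character pass with a single loop over the string that rejects a character if it is in the invalid set or a control character.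
import Mathlib
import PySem

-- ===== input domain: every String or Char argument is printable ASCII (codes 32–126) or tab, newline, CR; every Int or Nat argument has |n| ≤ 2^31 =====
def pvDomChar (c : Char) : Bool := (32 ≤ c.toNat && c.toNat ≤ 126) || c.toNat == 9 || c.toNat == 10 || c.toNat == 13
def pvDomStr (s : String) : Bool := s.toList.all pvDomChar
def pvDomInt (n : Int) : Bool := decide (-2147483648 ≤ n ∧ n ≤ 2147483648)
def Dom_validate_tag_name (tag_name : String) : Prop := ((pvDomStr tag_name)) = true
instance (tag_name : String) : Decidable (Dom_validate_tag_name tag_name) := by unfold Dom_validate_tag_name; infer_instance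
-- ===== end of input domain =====

-- B merges A's twelve per-invalid-character substring scans and its separate control-character
-- pass into one combined pass over the string (objective: simpler).

-- ===== PORT A =====
-- A's invalid_chars list
def invalidCharsA : List Char := [' ', '\t', '\n', ':', '*', '?', '"', '<', '>', '|', '\\', '/']

def validate_tag_name (tag_name : String) : Bool :=
  -- if not tag_name or len(tag_name) == 0: return False
  if tag_name.toList = [] ∨ PySem.Chars.len tag_name.toList = 0 then false
  -- if len(tag_name) > 100: return False
  else if PySem.Chars.len tag_name.toList > 100 then false
  -- if any(char in tag_name for char in invalid_chars): return False   ('char in tag_name' is a substring test)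
  else if invalidCharsA.any (fun c => PySem.Chars.isIn [c] tag_name.toList) then false
  -- if any(ord(char) < 32 for char in tag_name): return False
  else if tag_name.toList.any (fun c => c.toNat < 32) then false
  else true

-- ===== PORT B =====
-- B's invalid_set (a Python set of 12 distinct characters)
def invalidSetB : PySem.Set Char :=
  PySem.Set.ofList [' ', '\t', '\n', ':', '*', '?', '"', '<', '>', '|', '\\', '/']

-- B's single for-loop: returns false on the first bad character, true if the loop finishes
def bScan : List Char → Bool
  | [] => true
  | c :: rest =>
      if PySem.Set.contains invalidSetB c ∨ c.toNat < 32 then false else bScan rest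

def validate_tag_name_alt (tag_name : String) : Bool :=
  if tag_name.toList = [] then false
  else if PySem.Chars.len tag_name.toList > 100 then false
  else bScan tag_name.toList

-- ===== PRECONDITION & SPEC =====
def Spec_validate_tag_name (tag_name : String) (out : Bool) : Prop := out = validate_tag_name_alt tag_name
instance (tag_name : String) (out : Bool) : Decidable (Spec_validate_tag_name tag_name out) := by unfold Spec_validate_tag_name; infer_instance

-- ===== CLAIM (what is proved, stated in full; the proofs are below) =====
def Claim_equal_validate_tag_name : Prop := ∀ (tag_name : String), Dom_validate_tag_name tag_name → Spec_validate_tag_name tag_name (validate_tag_name tag_name)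

-- ===== LEMMAS AND PROOFS =====

-- B's scan returns true iff no character of the list is an invalid/control character
theorem bScan_eq_true_iff (s : List Char) :
    bScan s = true ↔ ∀ c ∈ s, ¬ (PySem.Set.contains invalidSetB c = true ∨ c.toNat < 32) := by
  induction s with
  | nil => simp [bScan]
  | cons c rest ih =>
    by_cases h : PySem.Set.contains invalidSetB c = true ∨ c.toNat < 32
    · rw [bScan, if_pos h]
      exact iff_of_false (by simp) fun hall => hall c List.mem_cons_self h
    · rw [bScan, if_neg h]
      simp only [List.mem_cons, ih]
      constructor
      · rintro hall d (rfl | hd)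
        · exact h
        · exact hall d hd
      · intro hall d hd; exact hall d (Or.inr hd)

-- single-character substring membership is list membership
theorem isIn_singleton_iff (c : Char) (s : List Char) :
    PySem.Chars.isIn [c] s = true ↔ c ∈ s := by
  rw [PySem.Chars.isIn_iff_infix]
  constructor
  · rintro ⟨p, q, h⟩
    subst h; simp
  · intro h
    obtain ⟨p, q, h⟩ := List.append_of_mem h
    exact ⟨p, q, by simp [h]⟩

-- membership in B's set is membership in A's list
theorem contains_invalidSetB_iff (c : Char) :
    PySem.Set.contains invalidSetB c = true ↔ c ∈ invalidCharsA := by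
  simp only [invalidSetB, invalidCharsA, PySem.Set.contains_eq_listContains,
    List.contains_eq_mem, PySem.Set.mem_ofList, decide_eq_true_eq]

-- A's two scan passes compute the same answer as B's single pass
theorem scans_eq_bScan (l : List Char) :
    (if invalidCharsA.any (fun c => PySem.Chars.isIn [c] l) then false
     else if l.any (fun c => c.toNat < 32) then false else true) = bScan l := by
  cases hb : bScan l
  · have hb' : ¬ ∀ c ∈ l, ¬ (PySem.Set.contains invalidSetB c = true ∨ c.toNat < 32) :=
      fun hall => by rw [(bScan_eq_true_iff l).2 hall] at hb; exact Bool.true_eq_false.mp hb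
    push Not at hb'
    obtain ⟨c, hc, hbad⟩ := hb'
    rcases Decidable.em (PySem.Set.contains invalidSetB c = true ∨ c.toNat < 32) with h | h
    · rcases h with h | h
      · have ha : invalidCharsA.any (fun c => PySem.Chars.isIn [c] l) = true :=
          List.any_eq_true.2 ⟨c, (contains_invalidSetB_iff c).1 h, (isIn_singleton_iff c l).2 hc⟩
        rw [if_pos ha]
      · have ha : l.any (fun c => c.toNat < 32) = true :=
          List.any_eq_true.2 ⟨c, hc, by simpa using h⟩
        cases hA : invalidCharsA.any (fun c => PySem.Chars.isIn [c] l) <;> simp [ha]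
    · exact absurd hbad (by simpa using h)
  · rw [bScan_eq_true_iff] at hb
    have hA : invalidCharsA.any (fun c => PySem.Chars.isIn [c] l) = false := by
      rw [List.any_eq_false]
      intro c hc hin
      exact hb _ ((isIn_singleton_iff c l).1 (by simpa using hin))
        (Or.inl ((contains_invalidSetB_iff c).2 hc))
    have hC : l.any (fun c => c.toNat < 32) = false := by
      rw [List.any_eq_false]
      intro c hc hin
      exact hb c hc (Or.inr (by simpa using hin))
    rw [hA, hC]; rfl

-- ===== VERDICT (by name: the statement is the Claim_ definition above) =====
theorem validate_tag_name_spec : Claim_equal_validate_tag_name := by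
  intro s _
  unfold Spec_validate_tag_name validate_tag_name validate_tag_name_alt
  by_cases hnil : s.toList = []
  · rw [if_pos (Or.inl hnil), if_pos hnil]
  · have h0 : ¬ (s.toList = [] ∨ PySem.Chars.len s.toList = 0) := by
      simp only [PySem.Chars.len]
      rintro (h | h)
      · exact hnil h
      · exact hnil (List.length_eq_zero_iff.mp (by exact_mod_cast h))
    rw [if_neg h0, if_neg (show ¬ s.toList = [] from hnil)]
    by_cases hlong : PySem.Chars.len s.toList > 100
    · rw [if_pos hlong, if_pos hlong]
    · rw [if_neg hlong, if_neg hlong]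
      exact scans_eq_bScan s.toList
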